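-- pv_equiv track=rewrite | github.com/joshanashakya/dissertation | workspace/dataset/java-python/GeeksForGeeks/2258/A/2.py | minimumNumberOfDigits
-- ===== SOURCE A (Python) =====
-- dp=[[-1 for i in range(8101)]for i in range(901)]
--
-- def minimumNumberOfDigits(a,b):
--     # Invalid condition
--     if (a > b or a < 0 or b < 0 or a > 900 or b > 8100):
--         return -1
--
--     # Number of digits satisfied
--     if (a == 0 and b == 0):
--         return 0
--
--     # Memoization
--     if (dp[a][b] != -1):
--         return dp[a][b]
--
--     # Initialize ans as maximum as we have to find the
--     # minimum number of digits
--     ans = 101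
--
--     #Check for all possible combinations of digits
--     for i in range(9,0,-1):
--
--         # recurrence call
--         k = minimumNumberOfDigits(a - i, b - (i * i))
--
--         # If the combination of digits cannot give sum as a
--         # and sum of square of digits as b
--         if (k != -1):
--             ans = min(ans, k + 1)
--
--     # Returns the minimum number of digits
--     dp[a][b] = ans
--     return ans
-- ===== SOURCE B (Python) =====
-- def minimumNumberOfDigits(a, b):
--     # Invalid condition (same contract as the original)
--     if (a > b or a < 0 or b < 0 or a > 900 or b > 8100):
--         return -1
--     # Bottom-up DP over a flat (a+1) x (b+1) table: t[s*W+q] is the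
--     # minimum number of digits (1..9) with digit sum s and square sum q,
--     # with 101 standing for "impossible" exactly as in the recursion.
--     W = b + 1
--     t = []
--     for s in range(a + 1):
--         for q in range(b + 1):
--             if s == 0 and q == 0:
--                 t.append(0)
--             else:
--                 t.append(min([101] + [t[(s - i) * W + (q - i * i)] + 1
--                                       for i in range(9, 0, -1)
--                                       if i <= s and i * i <= q]))
--     return t[a * W + b]
-- ===== Notes on version B (the rewrite author's own statement) =====
-- stated objective: alternative
-- what changed: Replaces A's top-down memoized recursion (global 901x8101 memo table filled on demand) by a bottom-up iterative DP that fills a flat (a+1)x(b+1) table in increasing (digit-sum, square-sum) order, treating A's 101 sentinel as an ordinary value in the minimum.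
import Mathlib
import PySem

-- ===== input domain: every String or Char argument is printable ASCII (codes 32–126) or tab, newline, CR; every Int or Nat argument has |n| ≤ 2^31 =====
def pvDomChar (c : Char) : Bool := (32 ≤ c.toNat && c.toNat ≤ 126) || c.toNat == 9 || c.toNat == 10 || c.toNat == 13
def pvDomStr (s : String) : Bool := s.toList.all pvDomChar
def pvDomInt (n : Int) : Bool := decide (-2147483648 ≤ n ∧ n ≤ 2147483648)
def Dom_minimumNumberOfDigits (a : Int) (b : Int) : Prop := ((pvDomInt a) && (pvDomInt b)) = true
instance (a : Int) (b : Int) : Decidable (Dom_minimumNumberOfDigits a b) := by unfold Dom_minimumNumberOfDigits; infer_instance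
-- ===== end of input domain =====

-- B replaces A's top-down memoized recursion by a bottom-up DP over a flat (a+1)×(b+1) table
-- (alternative decomposition, same cost class); return values agree on every input.

-- ===== PORT A =====
-- A's global 901×8101 memo list-of-lists is ported as a flat Array Int of size 901*8101 = 7299001
-- (index a*8101+b), threaded through the recursion in state-passing style: the memo is a pure
-- cache (each stored value is determined by its cell), so a fresh table per top-level call
-- returns the same value as Python's persistent global one.
def pvIdx (a b : Int) : Nat := (a * 8101 + b).toNat

def pvGoA (fuel : Nat) (a b : Int) (dp : Array Int) : Int × Array Int :=
  if a > b ∨ a < 0 ∨ b < 0 ∨ a > 900 ∨ b > 8100 then (-1, dp)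
  else if a = 0 ∧ b = 0 then (0, dp)
  else if (dp[pvIdx a b]?).getD (-1) ≠ -1 then ((dp[pvIdx a b]?).getD (-1), dp)
  else
    match fuel with
    | 0 => (-1, dp)  -- never reached: a call has fuel > a (valid states have a ≤ 900, a drops by ≥ 1)
    | f + 1 =>
      let p := (PySem.List.pyRange 9 0 (-1)).foldl
        (fun (p : Int × Array Int) i =>
          let r := pvGoA f (a - i) (b - i * i) p.2
          if r.1 ≠ -1 then (min p.1 (r.1 + 1), r.2) else (p.1, r.2))
        (101, dp)
      (p.1, p.2.setIfInBounds (pvIdx a b) p.1)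

def minimumNumberOfDigits (a : Int) (b : Int) : Int :=
  (pvGoA 901 a b (Array.replicate 7299001 (-1))).1

-- ===== PORT B =====
-- Source B's flat Python list t (O(1) indexing) is ported as an Array Int; t[k] is read as t[k]?.getD 0
-- (the index is always in bounds where Python would not raise).
def pvCell (t : Array Int) (W s q : Int) : Int :=
  if s = 0 ∧ q = 0 then 0
  else (((PySem.List.pyRange 9 0 (-1)).filter
           (fun i => decide (i ≤ s) && decide (i * i ≤ q))).map
           (fun i => (t[((s - i) * W + (q - i * i)).toNat]?).getD 0 + 1)).foldl min 101

def minimumNumberOfDigits_alt (a : Int) (b : Int) : Int :=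
  if a > b ∨ a < 0 ∨ b < 0 ∨ a > 900 ∨ b > 8100 then -1
  else
    let W := b + 1
    let t := (PySem.List.pyRange 0 (a + 1) 1).foldl
      (fun t s => (PySem.List.pyRange 0 (b + 1) 1).foldl
        (fun t q => t.push (pvCell t W s q)) t)
      #[]
    (t[(a * W + b).toNat]?).getD 0

-- ===== PRECONDITION & SPEC =====
def Spec_minimumNumberOfDigits (a : Int) (b : Int) (out : Int) : Prop := out = minimumNumberOfDigits_alt a b
instance (a : Int) (b : Int) (out : Int) : Decidable (Spec_minimumNumberOfDigits a b out) := by unfold Spec_minimumNumberOfDigits; infer_instance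

-- ===== CLAIM (what is proved, stated in full; the proofs are below) =====
def Claim_equal_minimumNumberOfDigits : Prop := ∀ (a : Int) (b : Int), Dom_minimumNumberOfDigits a b → Spec_minimumNumberOfDigits a b (minimumNumberOfDigits a b)

-- ===== LEMMAS AND PROOFS =====

-- the common value both programs compute on valid states: cF is the plain (unmemoized)
-- fuelled recurrence; pvC fixes the fuel at its canonical sufficient value.
def cF : Nat → Int → Int → Int
  | 0, _, _ => 0
  | f + 1, s, q =>
    if s = 0 ∧ q = 0 then 0
    else ([9, 8, 7, 6, 5, 4, 3, 2, 1] : List Int).foldl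
      (fun m i => if i ≤ s ∧ i * i ≤ q then min m (cF f (s - i) (q - i * i) + 1) else m) 101

def pvC (s q : Int) : Int := cF (s.toNat + 1) s q

def pvValid (a b : Int) : Prop := 0 ≤ a ∧ a ≤ b ∧ a ≤ 900 ∧ b ≤ 8100

lemma pyRange91 : PySem.List.pyRange 9 0 (-1) = [9, 8, 7, 6, 5, 4, 3, 2, 1] := by decide

lemma mem_l9 : ∀ i ∈ ([9, 8, 7, 6, 5, 4, 3, 2, 1] : List Int), 1 ≤ i ∧ i ≤ 9 := by decide

lemma foldl_min_if_keep {P : Int → Prop} [DecidablePred P] (g : Int → Int) :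
    ∀ (l : List Int) (m : Int), (∀ i ∈ l, P i → m ≤ g i) →
      l.foldl (fun m i => if P i then min m (g i) else m) m = m := by
  intro l
  induction l with
  | nil => intro m _; rfl
  | cons i l ih =>
    intro m h
    simp only [List.foldl_cons]
    have hstep : (if P i then min m (g i) else m) = m := by
      split
      · exact min_eq_left (h i (List.mem_cons_self) (by assumption))
      · rfl
    rw [hstep]
    exact ih m (fun j hj hP => h j (List.mem_cons_of_mem i hj) hP)

lemma foldl_min_if_nonneg {P : Int → Prop} [DecidablePred P] (g : Int → Int) :
    ∀ (l : List Int) (m : Int), 0 ≤ m → (∀ i ∈ l, P i → 0 ≤ g i) →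
      0 ≤ l.foldl (fun m i => if P i then min m (g i) else m) m := by
  intro l
  induction l with
  | nil => intro m hm _; exact hm
  | cons i l ih =>
    intro m hm h
    simp only [List.foldl_cons]
    refine ih _ ?_ (fun j hj hP => h j (List.mem_cons_of_mem i hj) hP)
    split
    · exact le_min hm (h i (List.mem_cons_self) (by assumption))
    · exact hm

lemma cF_nonneg : ∀ (f : Nat) (s q : Int), 0 ≤ cF f s q := by
  intro f
  induction f with
  | zero => intro s q; simp [cF]
  | succ f ih =>
    intro s q
    simp only [cF]
    split
    · norm_num
    · exact foldl_min_if_nonneg _ _ 101 (by norm_num)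
        (fun i _ _ => by have := ih (s - i) (q - i * i); omega)

lemma cF_stable : ∀ (n f f' : Nat) (s q : Int), 0 ≤ s → s.toNat ≤ n → n < f → n < f' →
    cF f s q = cF f' s q := by
  intro n
  induction n using Nat.strong_induction_on with
  | _ n ihn =>
    intro f f' s q hs hn hf hf'
    cases f with
    | zero => omega
    | succ f1 =>
      cases f' with
      | zero => omega
      | succ f1' =>
        simp only [cF]
        split
        · rfl
        · apply List.foldl_ext
          intro m i hi
          obtain ⟨hi1, _⟩ := mem_l9 i hi
          by_cases hc : i ≤ s ∧ i * i ≤ q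
          · rw [if_pos hc, if_pos hc]
            have hrec : cF f1 (s - i) (q - i * i) = cF f1' (s - i) (q - i * i) := by
              have hs1 : 1 ≤ s.toNat := by omega
              exact ihn (n - 1) (by omega) f1 f1' (s - i) (q - i * i)
                (by omega) (by omega) (by omega) (by omega)
            rw [hrec]
          · rw [if_neg hc, if_neg hc]

lemma cF_eq_pvC (f : Nat) (s q : Int) (hs : 0 ≤ s) (hf : s.toNat < f) : cF f s q = pvC s q := by
  exact cF_stable s.toNat f (s.toNat + 1) s q hs le_rfl hf (Nat.lt_succ_self _)

lemma cF_gt : ∀ (f : Nat) (s q : Int), 0 ≤ s → 0 ≤ q → q < s → s.toNat < f → cF f s q = 101 := by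
  intro f
  induction f with
  | zero => intro s q _ _ _ hf; omega
  | succ f ih =>
    intro s q hs hq hlt hf
    simp only [cF]
    rw [if_neg (by omega)]
    apply foldl_min_if_keep
    intro i hi hP
    obtain ⟨hi1, _⟩ := mem_l9 i hi
    have hii : i ≤ i * i := le_mul_of_one_le_left (by omega) hi1
    have h101 : cF f (s - i) (q - i * i) = 101 :=
      ih (s - i) (q - i * i) (by omega) (by omega) (by omega) (by omega)
    omega

lemma pvC_gt (s q : Int) (hs : 0 ≤ s) (hq : 0 ≤ q) (h : q < s) : pvC s q = 101 := by
  exact cF_gt (s.toNat + 1) s q hs hq h (Nat.lt_succ_self _)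

lemma pvC_zero : pvC 0 0 = 0 := by decide

lemma pvC_unfold (s q : Int) (hs : 0 ≤ s) (_hq : 0 ≤ q) (h00 : ¬(s = 0 ∧ q = 0)) :
    pvC s q = ([9, 8, 7, 6, 5, 4, 3, 2, 1] : List Int).foldl
      (fun m i => if i ≤ s ∧ i * i ≤ q then min m (pvC (s - i) (q - i * i) + 1) else m) 101 := by
  suffices h : cF (s.toNat + 1) s q = ([9, 8, 7, 6, 5, 4, 3, 2, 1] : List Int).foldl
      (fun m i => if i ≤ s ∧ i * i ≤ q then min m (pvC (s - i) (q - i * i) + 1) else m) 101 by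
    exact h
  simp only [cF]
  rw [if_neg h00]
  apply List.foldl_ext
  intro m i hi
  obtain ⟨hi1, _⟩ := mem_l9 i hi
  by_cases hc : i ≤ s ∧ i * i ≤ q
  · rw [if_pos hc, if_pos hc,
      cF_eq_pvC s.toNat (s - i) (q - i * i) (by omega) (by omega)]
  · rw [if_neg hc, if_neg hc]

-- injectivity of the flat index for a row width w
lemma idxW_inj (w s q s' q' : Int) (hw : 0 < w) (hq0 : 0 ≤ q) (hq : q < w) (hq0' : 0 ≤ q')
    (hq' : q' < w) (h : s * w + q = s' * w + q') : s = s' ∧ q = q' := by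
  have h' : q + s * w = q' + s' * w := by linarith
  have hzero : q / w = 0 := Int.ediv_eq_zero_of_lt hq0 hq
  have hzero' : q' / w = 0 := Int.ediv_eq_zero_of_lt hq0' hq'
  have hw0 : w ≠ 0 := by omega
  have hss : s = s' := by
    have h1 : (q + s * w) / w = s := by rw [Int.add_mul_ediv_right q s hw0, hzero]; ring
    have h2 : (q' + s' * w) / w = s' := by rw [Int.add_mul_ediv_right q' s' hw0, hzero']; ring
    rw [← h1, h', h2]
  refine ⟨hss, by rw [hss] at h'; linarith⟩

lemma pvIdx_inj (s q a b : Int) (h1 : pvValid s q) (h2 : pvValid a b)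
    (h : pvIdx s q = pvIdx a b) : s = a ∧ q = b := by
  unfold pvIdx at h
  unfold pvValid at h1 h2
  omega

lemma pvIdx_lt (a b : Int) (h : pvValid a b) : pvIdx a b < 7299001 := by
  unfold pvIdx
  unfold pvValid at h
  omega

lemma toNat_lt_toNat' (X Y : Int) (h1 : 0 ≤ X) (h2 : X < Y) : X.toNat < Y.toNat := by omega

lemma toNat_inj' (X Y : Int) (h1 : 0 ≤ X) (h2 : 0 ≤ Y) (h : X.toNat = Y.toNat) : X = Y := by omega

lemma toNat_succ' (X : Int) (h : 0 ≤ X) : X.toNat + 1 = (X + 1).toNat := by omega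

def MemoOK (dp : Array Int) : Prop :=
  ∀ s q : Int, pvValid s q →
    (dp[pvIdx s q]?).getD (-1) = -1 ∨ (dp[pvIdx s q]?).getD (-1) = pvC s q

lemma pvGoA_invalid (fuel : Nat) (a b : Int) (dp : Array Int) (h : ¬ pvValid a b) :
    pvGoA fuel a b dp = (-1, dp) := by
  have hg : a > b ∨ a < 0 ∨ b < 0 ∨ a > 900 ∨ b > 8100 := by unfold pvValid at h; omega
  rw [pvGoA.eq_def, if_pos hg]

def pvStepA (f : Nat) (a b : Int) : Int × Array Int → Int → Int × Array Int :=
  fun p i =>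
    let r := pvGoA f (a - i) (b - i * i) p.2
    if r.1 ≠ -1 then (min p.1 (r.1 + 1), r.2) else (p.1, r.2)

def pvStepP (a b : Int) : Int → Int → Int :=
  fun m i => if i ≤ a ∧ i * i ≤ b then min m (pvC (a - i) (b - i * i) + 1) else m

lemma pvGoA_step (f : Nat) (a b : Int) (dp : Array Int)
    (hg : ¬(a > b ∨ a < 0 ∨ b < 0 ∨ a > 900 ∨ b > 8100)) (h00 : ¬(a = 0 ∧ b = 0))
    (hne : ¬((dp[pvIdx a b]?).getD (-1) ≠ -1)) :
    pvGoA (f + 1) a b dp =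
      (((PySem.List.pyRange 9 0 (-1)).foldl (pvStepA f a b) (101, dp)).1,
       ((PySem.List.pyRange 9 0 (-1)).foldl (pvStepA f a b) (101, dp)).2.setIfInBounds (pvIdx a b)
         (((PySem.List.pyRange 9 0 (-1)).foldl (pvStepA f a b) (101, dp)).1)) := by
  rw [pvGoA.eq_def, if_neg hg, if_neg h00, if_neg hne]
  rfl

lemma pvGoA_valid : ∀ (fuel : Nat) (a b : Int) (dp : Array Int), pvValid a b →
    dp.size = 7299001 → MemoOK dp → a.toNat < fuel →
    (pvGoA fuel a b dp).1 = pvC a b ∧ (pvGoA fuel a b dp).2.size = 7299001 ∧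
      MemoOK (pvGoA fuel a b dp).2 := by
  intro fuel
  induction fuel with
  | zero => intro a b dp _ _ _ hf; exact absurd hf (Nat.not_lt_zero _)
  | succ f ih =>
    intro a b dp hv hsz hm hf
    obtain ⟨hv1, hv2, hv3, hv4⟩ := hv
    have hguard : ¬(a > b ∨ a < 0 ∨ b < 0 ∨ a > 900 ∨ b > 8100) := by omega
    by_cases h00 : a = 0 ∧ b = 0
    · rw [pvGoA.eq_def, if_neg hguard, if_pos h00]
      obtain ⟨rfl, rfl⟩ := h00
      exact ⟨by rw [pvC_zero], hsz, hm⟩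
    · by_cases hne : (dp[pvIdx a b]?).getD (-1) ≠ -1
      · rw [pvGoA.eq_def, if_neg hguard, if_neg h00, if_pos hne]
        rcases hm a b ⟨hv1, hv2, hv3, hv4⟩ with h | h
        · exact absurd h hne
        · exact ⟨h, hsz, hm⟩
      · rw [pvGoA_step f a b dp hguard h00 hne]
        have hloop : ∀ (l : List Int), (∀ i ∈ l, 1 ≤ i ∧ i ≤ 9) →
            ∀ (m : Int) (d : Array Int), m ≤ 101 → d.size = 7299001 → MemoOK d →
            (l.foldl (pvStepA f a b) (m, d)).1 = l.foldl (pvStepP a b) m ∧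
              (l.foldl (pvStepA f a b) (m, d)).2.size = 7299001 ∧
              MemoOK (l.foldl (pvStepA f a b) (m, d)).2 := by
          intro l
          induction l with
          | nil => intro _ m d _ hsz' hm'; exact ⟨rfl, hsz', hm'⟩
          | cons i l ihl =>
            intro hmem m d hm101 hsz' hm'
            obtain ⟨hi1, hi9⟩ := hmem i List.mem_cons_self
            have hmem' := fun j hj => hmem j (List.mem_cons_of_mem i hj)
            have hii : i ≤ i * i := le_mul_of_one_le_left (by omega) hi1
            simp only [List.foldl_cons]
            by_cases hc : i ≤ a ∧ i * i ≤ b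
            · obtain ⟨hca, hcb⟩ := hc
              by_cases hvc : pvValid (a - i) (b - i * i)
              · obtain ⟨hw1, hw2, hw3, hw4⟩ := hvc
                have hrec := ih (a - i) (b - i * i) d ⟨hw1, hw2, hw3, hw4⟩ hsz' hm' (by omega)
                have h0' : 0 ≤ pvC (a - i) (b - i * i) := cF_nonneg _ _ _
                have hne1 : (pvGoA f (a - i) (b - i * i) d).1 ≠ -1 := by
                  rw [hrec.1]; omega
                have hstep : pvStepA f a b (m, d) i =
                    (min m (pvC (a - i) (b - i * i) + 1), (pvGoA f (a - i) (b - i * i) d).2) := by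
                  unfold pvStepA
                  simp only [hrec.1]
                  rw [if_pos (show pvC (a - i) (b - i * i) ≠ -1 by omega)]
                have hstepP : pvStepP a b m i = min m (pvC (a - i) (b - i * i) + 1) := by
                  unfold pvStepP
                  rw [if_pos ⟨hca, hcb⟩]
                rw [hstep, hstepP]
                exact ihl hmem' _ _ (le_trans (min_le_left _ _) hm101) hrec.2.1 hrec.2.2
              · have hgt : b - i * i < a - i := by
                  rcases lt_or_ge (b - i * i) (a - i) with hgot | hcon
                  · exact hgot
                  · exact absurd ⟨by omega, hcon, by omega, by linarith⟩ hvc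
                have hstep : pvStepA f a b (m, d) i = (m, d) := by
                  unfold pvStepA
                  rw [pvGoA_invalid f (a - i) (b - i * i) d hvc]
                  simp
                have hstepP : pvStepP a b m i = min m 102 := by
                  unfold pvStepP
                  rw [if_pos ⟨hca, hcb⟩,
                    pvC_gt (a - i) (b - i * i) (by omega) (by linarith) hgt]
                  norm_num
                rw [hstep, hstepP, min_eq_left (by omega)]
                exact ihl hmem' m d hm101 hsz' hm'
            · have hni : ¬ pvValid (a - i) (b - i * i) := by
                rintro ⟨hp1, hp2, -, -⟩
                rcases not_and_or.mp hc with h | h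
                · omega
                · linarith [not_le.mp h]
              have hstep : pvStepA f a b (m, d) i = (m, d) := by
                unfold pvStepA
                rw [pvGoA_invalid f (a - i) (b - i * i) d hni]
                simp
              have hstepP : pvStepP a b m i = m := by
                unfold pvStepP
                rw [if_neg hc]
              rw [hstep, hstepP]
              exact ihl hmem' m d hm101 hsz' hm'
        rw [pyRange91]
        obtain ⟨he1, he2, he3⟩ := hloop [9, 8, 7, 6, 5, 4, 3, 2, 1] mem_l9 101 dp le_rfl hsz hm
        have hfold : ([9, 8, 7, 6, 5, 4, 3, 2, 1] : List Int).foldl (pvStepP a b) 101 = pvC a b := by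
          rw [pvC_unfold a b (by omega) (by omega) h00]
          rfl
        have hans : (([9, 8, 7, 6, 5, 4, 3, 2, 1] : List Int).foldl (pvStepA f a b) (101, dp)).1 = pvC a b := by
          rw [he1, hfold]
        refine ⟨hans, ?_, ?_⟩
        · simp only [Array.size_setIfInBounds]
          exact he2
        · intro s q hsq
          by_cases hidx : pvIdx s q = pvIdx a b
          · right
            have hlt : pvIdx a b < (([9, 8, 7, 6, 5, 4, 3, 2, 1] : List Int).foldl (pvStepA f a b) (101, dp)).2.size := by
              rw [he2]; exact pvIdx_lt a b ⟨hv1, hv2, hv3, hv4⟩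
            obtain ⟨rfl, rfl⟩ := pvIdx_inj s q a b hsq ⟨hv1, hv2, hv3, hv4⟩ hidx
            rw [Array.getElem?_setIfInBounds, if_pos rfl, if_pos hlt, Option.getD_some]
            exact hans
          · rw [Array.getElem?_setIfInBounds, if_neg (fun h => hidx h.symm)]
            exact he3 s q hsq

-- B-side table invariant: every filled cell holds pvC of its coordinates
def TOK (b : Int) (t : Array Int) : Prop :=
  ∀ s q : Int, 0 ≤ s → 0 ≤ q → q ≤ b → (s * (b + 1) + q).toNat < t.size →
    (t[(s * (b + 1) + q).toNat]?).getD 0 = pvC s q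

lemma pvCell_eq (b s q : Int) (t : Array Int) (hb : 0 ≤ b) (hs : 0 ≤ s) (hq : 0 ≤ q)
    (hqb : q ≤ b) (hsize : t.size = ((s * (b + 1) + q).toNat)) (ht : TOK b t) :
    pvCell t (b + 1) s q = pvC s q := by
  by_cases h00 : s = 0 ∧ q = 0
  · unfold pvCell
    rw [if_pos h00]
    obtain ⟨rfl, rfl⟩ := h00
    exact pvC_zero.symm
  · unfold pvCell
    rw [if_neg h00, pyRange91, List.foldl_map, List.foldl_filter,
      pvC_unfold s q hs hq h00]
    apply List.foldl_ext
    intro m i hi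
    obtain ⟨hi1, hi9⟩ := mem_l9 i hi
    have hii : i ≤ i * i := le_mul_of_one_le_left (by omega) hi1
    simp only [Bool.and_eq_true, decide_eq_true_eq]
    by_cases hc : i ≤ s ∧ i * i ≤ q
    · rw [if_pos hc, if_pos hc]
      obtain ⟨hca, hcb⟩ := hc
      have hle : 0 ≤ (s - i) * (b + 1) + (q - i * i) :=
        add_nonneg (mul_nonneg (by omega) (by omega)) (by linarith)
      have hlt : (s - i) * (b + 1) + (q - i * i) < s * (b + 1) + q := by
        nlinarith [mul_le_mul_of_nonneg_right (show s - i ≤ s - 1 by omega)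
          (show (0 : Int) ≤ b + 1 by omega)]
      have hltN : ((s - i) * (b + 1) + (q - i * i)).toNat < t.size := by
        rw [hsize]
        exact toNat_lt_toNat' _ _ hle hlt
      rw [ht (s - i) (q - i * i) (by omega) (by linarith) (by linarith) hltN]
    · rw [if_neg hc, if_neg hc]

lemma TOK_push (b : Int) (t : Array Int) (s q : Int) (hb : 0 ≤ b) (hs : 0 ≤ s) (hq : 0 ≤ q)
    (hqb : q ≤ b) (hsize : t.size = (s * (b + 1) + q).toNat) (ht : TOK b t) :
    TOK b (t.push (pvC s q)) := by
  intro s' q' hs' hq' hqb' hlt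
  rw [Array.size_push] at hlt
  by_cases hk : (s' * (b + 1) + q').toNat < t.size
  · rw [show (t.push (pvC s q))[(s' * (b + 1) + q').toNat]? = t[(s' * (b + 1) + q').toNat]? from by
      simp [Array.getElem?_push, Nat.ne_of_lt hk, hk]]
    exact ht s' q' hs' hq' hqb' hk
  · have hkeq : (s' * (b + 1) + q').toNat = t.size := by omega
    have hEq : s' * (b + 1) + q' = s * (b + 1) + q := by
      refine toNat_inj' _ _ (add_nonneg (mul_nonneg hs' (by omega)) hq')
        (add_nonneg (mul_nonneg hs (by omega)) hq) ?_
      rw [hkeq, hsize]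
    obtain ⟨h1, h2⟩ := idxW_inj (b + 1) s' q' s q (by omega) hq' (by omega) hq (by omega) hEq
    subst h1
    subst h2
    rw [hkeq]
    simp

lemma pvTable (a b : Int) (hv : pvValid a b) :
    minimumNumberOfDigits_alt a b = pvC a b := by
  obtain ⟨hv1, hv2, hv3, hv4⟩ := hv
  have hb : 0 ≤ b := by omega
  have hrow : ∀ (s : Int), 0 ≤ s → ∀ (m : Nat), (m : Int) ≤ b + 1 →
      ∀ t : Array Int, TOK b t → t.size = (s * (b + 1)).toNat →
      TOK b ((PySem.List.pyRange 0 (m : Int) 1).foldl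
          (fun t q => t.push (pvCell t (b + 1) s q)) t) ∧
        ((PySem.List.pyRange 0 (m : Int) 1).foldl
          (fun t q => t.push (pvCell t (b + 1) s q)) t).size = (s * (b + 1) + m).toNat := by
    intro s hs0 m
    induction m with
    | zero =>
      intro _ t htok hsz
      rw [show ((0 : Nat) : Int) = 0 by norm_num, PySem.List.pyRange_one_eq_nil le_rfl]
      simpa using ⟨htok, hsz⟩
    | succ m ihm =>
      intro hm t htok hsz
      have hm' : (m : Int) ≤ b + 1 := by push_cast at hm ⊢; omega
      rw [show ((m + 1 : Nat) : Int) = (m : Int) + 1 by push_cast; ring,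
        show PySem.List.pyRange 0 ((m : Int) + 1) = PySem.List.pyRange 0 (m : Int) ++ [(m : Int)] from
          PySem.List.pyRange_one_succ_right (by positivity), List.foldl_append]
      obtain ⟨htok1, hsz1⟩ := ihm hm' t htok hsz
      simp only [List.foldl_cons, List.foldl_nil]
      have hmb : (m : Int) ≤ b := by push_cast at hm; omega
      have hcell : pvCell ((PySem.List.pyRange 0 (m : Int) 1).foldl
          (fun t q => t.push (pvCell t (b + 1) s q)) t) (b + 1) s (m : Int) = pvC s (m : Int) :=
        pvCell_eq b s (m : Int) _ hb hs0 (by positivity) hmb hsz1 htok1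
      rw [hcell]
      refine ⟨TOK_push b _ s (m : Int) hb hs0 (by positivity) hmb hsz1 htok1, ?_⟩
      rw [Array.size_push, hsz1]
      have h0 : 0 ≤ s * (b + 1) + (m : Int) :=
        add_nonneg (mul_nonneg hs0 (by omega)) (by positivity)
      rw [toNat_succ' _ h0]
      ring_nf
  have houter : ∀ (n : Nat), (n : Int) ≤ a + 1 →
      TOK b ((PySem.List.pyRange 0 (n : Int) 1).foldl
          (fun t s => (PySem.List.pyRange 0 (b + 1) 1).foldl
            (fun t q => t.push (pvCell t (b + 1) s q)) t) #[]) ∧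
        ((PySem.List.pyRange 0 (n : Int) 1).foldl
          (fun t s => (PySem.List.pyRange 0 (b + 1) 1).foldl
            (fun t q => t.push (pvCell t (b + 1) s q)) t) #[]).size = ((n : Int) * (b + 1)).toNat := by
    intro n
    induction n with
    | zero =>
      intro _
      rw [show ((0 : Nat) : Int) = 0 by norm_num, PySem.List.pyRange_one_eq_nil le_rfl]
      constructor
      · intro s' q' _ _ _ hlt
        simp at hlt
      · simp
    | succ n ihn =>
      intro hn
      have hn' : (n : Int) ≤ a + 1 := by push_cast at hn ⊢; omega
      rw [show ((n + 1 : Nat) : Int) = (n : Int) + 1 by push_cast; ring,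
        show PySem.List.pyRange 0 ((n : Int) + 1) = PySem.List.pyRange 0 (n : Int) ++ [(n : Int)] from
          PySem.List.pyRange_one_succ_right (by positivity), List.foldl_append]
      obtain ⟨htok1, hsz1⟩ := ihn hn'
      simp only [List.foldl_cons, List.foldl_nil]
      have hcast : (((b + 1).toNat : Nat) : Int) = b + 1 := by omega
      have hr := hrow (n : Int) (by positivity) (b + 1).toNat (by omega) _ htok1 hsz1
      rw [hcast] at hr
      refine ⟨hr.1, ?_⟩
      rw [hr.2]
      congr 1
      ring
  have hfin := houter (a + 1).toNat (by omega)
  have hcast : (((a + 1).toNat : Nat) : Int) = a + 1 := by omega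
  rw [hcast] at hfin
  obtain ⟨htok, hsz⟩ := hfin
  have hguard : ¬(a > b ∨ a < 0 ∨ b < 0 ∨ a > 900 ∨ b > 8100) := by omega
  unfold minimumNumberOfDigits_alt
  rw [if_neg hguard]
  have hidxlt : (a * (b + 1) + b).toNat < ((a + 1) * (b + 1)).toNat := by
    refine toNat_lt_toNat' _ _ (add_nonneg (mul_nonneg hv1 (by omega)) hb) (by nlinarith)
  rw [← hsz] at hidxlt
  exact htok a b hv1 hb le_rfl hidxlt

-- ===== VERDICT (by name: the statement is the Claim_ definition above) =====
theorem minimumNumberOfDigits_spec : Claim_equal_minimumNumberOfDigits := by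
  intro a b _hdom
  unfold Spec_minimumNumberOfDigits
  by_cases hv : pvValid a b
  · have hA := pvGoA_valid 901 a b (Array.replicate 7299001 (-1)) hv (by simp)
      (by intro s q hsq; left; simp [pvIdx_lt s q hsq])
      (by rcases hv with ⟨h1, h2, h3, h4⟩; omega)
    rw [pvTable a b hv, minimumNumberOfDigits, hA.1]
  · have hg : (a > b ∨ a < 0 ∨ b < 0 ∨ a > 900 ∨ b > 8100) := by unfold pvValid at hv; omega
    rw [minimumNumberOfDigits, pvGoA_invalid 901 a b _ hv]
    rw [minimumNumberOfDigits_alt, if_pos hg]
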